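-- pv_equiv track=rewrite | github.com/yongsun-yoon/python-algorithms | programmers/140108.py | solution
-- ===== SOURCE A (Python) =====
-- def solution(s):
--     x, diff, answer = None, 0, 0
--
--     for c in s:
--         if x is None:
--             x = c
--
--         if x == c:
--             diff += 1
--         else:
--             diff -= 1
--
--         if diff == 0:
--             answer += 1
--             x = None
--             diff = 0
--
--     if diff != 0:
--         answer += 1
--
--     return answer
-- ===== SOURCE B (Python) =====
-- def solution(s):
--     # Pair-scan: diff can only return to 0 after an even number of chars in a
--     # group, so each group is consumed two characters at a time; d is the pair
--     # balance ((#leader chars) - (#pairs)), and the while/else catches the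
--     # unbalanced tail (including a lone trailing character).
--     answer, i, n = 0, 0, len(s)
--     while i < n:
--         x, d = s[i], 0
--         while i + 1 < n:
--             d += (s[i] == x) + (s[i + 1] == x) - 1
--             i += 2
--             if d == 0:
--                 break
--         else:
--             return answer + 1
--         answer += 1
--     return answer
-- ===== Notes on version B (the rewrite author's own statement) =====
-- stated objective: alternative
-- what changed: Replaced A's per-character state machine (sentinel x=None plus signed diff updated once per char, checked for 0 after every char) by a stride-2 pair scan: the parity invariant that diff returns to 0 only after an even number of characters lets B consume each group two characters at a time with a per-pair delta in {-1,0,+1}, a while/else catching the unbalanced tail.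
import Mathlib
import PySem

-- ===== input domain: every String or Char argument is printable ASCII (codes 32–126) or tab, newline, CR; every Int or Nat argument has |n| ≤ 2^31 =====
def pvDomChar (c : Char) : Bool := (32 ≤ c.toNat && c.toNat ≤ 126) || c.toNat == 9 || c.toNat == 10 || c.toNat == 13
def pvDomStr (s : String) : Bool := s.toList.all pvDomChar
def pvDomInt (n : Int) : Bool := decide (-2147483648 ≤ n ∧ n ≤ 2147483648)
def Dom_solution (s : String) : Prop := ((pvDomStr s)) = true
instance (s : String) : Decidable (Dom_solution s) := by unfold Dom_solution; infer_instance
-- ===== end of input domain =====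

-- B replaces A's per-character sentinel/diff state machine by a stride-2 pair scan
-- (each group is consumed two characters at a time; a parity invariant justifies it).

-- ===== PORT A =====
-- one iteration of A's for-loop; state = (x, diff, answer)
def aStep (st : Option Char × Int × Int) (c : Char) : Option Char × Int × Int :=
  let x : Option Char := match st.1 with
    | none => some c
    | some y => some y
  let diff : Int := if x = some c then st.2.1 + 1 else st.2.1 - 1
  if diff = 0 then (none, 0, st.2.2 + 1) else (x, diff, st.2.2)

def solution (s : String) : Int :=
  let st := s.toList.foldl aStep (none, 0, 0)
  if st.2.1 ≠ 0 then st.2.2 + 1 else st.2.2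

-- ===== PORT B =====
-- B's inner `while i + 1 < n … else` loop: consume pairs for the group led by x,
-- d += (s[i] == x) + (s[i+1] == x) - 1;
-- `some rest` = break with d = 0 (group closed), `none` = pairs exhausted (while/else branch)
def bConsume (x : Char) (d : Int) : List Char → Option (List Char)
  | c1 :: c2 :: rest =>
      if d + (if c1 = x then (1 : Int) else 0) + (if c2 = x then 1 else 0) - 1 = 0 then some rest
      else bConsume x (d + (if c1 = x then 1 else 0) + (if c2 = x then 1 else 0) - 1) rest
  | _ => none

-- termination measure for the outer loop (cited by bLoop's decreasing_by)
theorem bConsume_len_aux (n : Nat) : ∀ (x : Char) (d : Int) (l rest : List Char),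
    l.length ≤ n → bConsume x d l = some rest → rest.length < l.length := by
  induction n with
  | zero =>
    intro x d l rest hl h
    have : l = [] := List.eq_nil_of_length_eq_zero (Nat.le_zero.mp hl)
    subst this; simp [bConsume] at h
  | succ n ih =>
    intro x d l rest hl h
    match l with
    | [] => simp [bConsume] at h
    | [c] => simp [bConsume] at h
    | c1 :: c2 :: r =>
      rw [bConsume] at h
      set e1 : Int := (if c1 = x then (1 : Int) else 0) with he1
      set e2 : Int := (if c2 = x then (1 : Int) else 0) with he2
      split at h
      · cases h; simp
      · have hr : r.length ≤ n := by simp at hl; omega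
        have := ih x _ r rest hr h
        simp only [List.length_cons]
        omega

theorem bConsume_len (x : Char) (d : Int) (l rest : List Char)
    (h : bConsume x d l = some rest) : rest.length < l.length :=
  bConsume_len_aux l.length x d l rest (le_refl _) h

-- B's outer while loop: one answer per group; `none` from bConsume is the
-- `return answer + 1` of the while/else branch
def bLoop : List Char → Int
  | [] => 0
  | c :: t =>
      match h : bConsume c 0 (c :: t) with
      | some rest => 1 + bLoop rest
      | none => 1
termination_by l => l.length
decreasing_by exact bConsume_len _ _ _ _ h

def solution_alt (s : String) : Int := bLoop s.toList

-- ===== PRECONDITION & SPEC =====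
def Spec_solution (s : String) (out : Int) : Prop := out = solution_alt s
instance (s : String) (out : Int) : Decidable (Spec_solution s out) := by unfold Spec_solution; infer_instance

-- ===== CLAIM (what is proved, stated in full; the proofs are below) =====
def Claim_equal_solution : Prop := ∀ (s : String), Dom_solution s → Spec_solution s (solution s)

-- ===== LEMMAS AND PROOFS =====

-- A's final answer extraction
def finAns (st : Option Char × Int × Int) : Int := if st.2.1 ≠ 0 then st.2.2 + 1 else st.2.2

-- what B adds for the rest of a group whose pair scan continues with balance d
def bTail (x : Char) (d : Int) (l : List Char) : Int :=
  match bConsume x d l with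
  | some rest => 1 + bLoop rest
  | none => 1

theorem bLoop_cons (c : Char) (t : List Char) :
    bLoop (c :: t) = (match bConsume c 0 (c :: t) with
      | some rest => 1 + bLoop rest
      | none => 1) := by
  rw [bLoop]
  rcases hx : bConsume c 0 (c :: t) with _ | rest <;> simp

-- Joint invariant, by strong induction on length:
-- T: from A's fresh state (none, 0, ans), A's final answer is ans + bLoop l;
-- C: mid-group, A's diff is exactly TWICE B's pair balance d (the parity invariant:
--    diff returns to 0 only after an even number of characters of the group),
--    and for d ≠ 0 A's final answer is ans + bTail x d l.
theorem joint (n : Nat) :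
    (∀ l : List Char, l.length ≤ n → ∀ ans : Int,
        finAns (l.foldl aStep (none, 0, ans)) = ans + bLoop l) ∧
    (∀ l : List Char, l.length ≤ n → ∀ (x : Char) (d ans : Int), d ≠ 0 →
        finAns (l.foldl aStep (some x, 2 * d, ans)) = ans + bTail x d l) := by
  induction n with
  | zero =>
    constructor
    · intro l hl ans
      have : l = [] := List.eq_nil_of_length_eq_zero (Nat.le_zero.mp hl)
      subst this; simp [bLoop, finAns]
    · intro l hl x d ans hd
      have : l = [] := List.eq_nil_of_length_eq_zero (Nat.le_zero.mp hl)
      subst this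
      have h2 : (2 : Int) * d ≠ 0 := by omega
      simp [bConsume, bTail, finAns, h2]
  | succ n ih =>
    obtain ⟨ihT, ihC⟩ := ih
    have stepT : ∀ (c : Char) (ans : Int), aStep (none, 0, ans) c = (some c, 1, ans) := by
      intro c ans; simp [aStep]
    constructor
    · -- T: fresh group
      intro l hl ans
      match l with
      | [] => simp [bLoop, finAns]
      | [c] =>
        rw [List.foldl_cons, stepT]
        simp [bLoop, bConsume, finAns]
      | c :: c2 :: rest =>
        have hr : rest.length ≤ n := by simp at hl; omega
        rw [List.foldl_cons, stepT, List.foldl_cons, bLoop_cons]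
        by_cases hc2 : c2 = c
        · -- pair delta = 1: diff becomes 2, group continues with d' = 1
          have h1 : aStep (some c, 1, ans) c2 = (some c, 2 * 1, ans) := by
            simp [aStep, hc2]
          have h2 : bConsume c 0 (c :: c2 :: rest) = bConsume c 1 rest := by
            simp [bConsume, hc2]
          rw [h1, ihC rest hr c 1 ans (by norm_num), h2, bTail]
        · -- pair delta = 0: diff returns to 0, group closes
          have h1 : aStep (some c, 1, ans) c2 = (none, 0, ans + 1) := by
            simp [aStep, Ne.symm hc2]
          have h2 : bConsume c 0 (c :: c2 :: rest) = some rest := by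
            simp [bConsume, hc2]
          rw [h1, ihT rest hr (ans + 1), h2]
          ring
    · -- C: mid-group with pair balance d ≠ 0, A's diff = 2d
      intro l hl x d ans hd
      match l with
      | [] =>
        have h2 : (2 : Int) * d ≠ 0 := by omega
        simp [bConsume, bTail, finAns, h2]
      | [c] =>
        -- one char left: diff becomes odd (2d ± 1 ≠ 0), B's while/else returns answer + 1
        rw [List.foldl_cons]
        by_cases hc : c = x
        · have h1 : aStep (some x, 2 * d, ans) c = (some x, 2 * d + 1, ans) := by
            simp [aStep, hc, show ¬ (2 * d + 1 = 0) from by omega]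
          simp [h1, bTail, bConsume, finAns, show 2 * d + 1 ≠ 0 from by omega]
        · have h1 : aStep (some x, 2 * d, ans) c = (some x, 2 * d - 1, ans) := by
            simp [aStep, Ne.symm hc, show ¬ (2 * d - 1 = 0) from by omega]
          simp [h1, bTail, bConsume, finAns, show 2 * d - 1 ≠ 0 from by omega]
      | c1 :: c2 :: rest =>
        have hr : rest.length ≤ n := by simp at hl; omega
        rw [List.foldl_cons, List.foldl_cons]
        by_cases h1c : c1 = x <;> by_cases h2c : c2 = x
        · -- both match: pair delta = +1
          have ha1 : aStep (some x, 2 * d, ans) c1 = (some x, 2 * d + 1, ans) := by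
            simp [aStep, h1c, show ¬ (2 * d + 1 = 0) from by omega]
          by_cases hz : d + 1 = 0
          · have ha2 : aStep (some x, 2 * d + 1, ans) c2 = (none, 0, ans + 1) := by
              simp [aStep, h2c, show 2 * d + 1 + 1 = 0 from by omega]
            have hb : bConsume x d (c1 :: c2 :: rest) = some rest := by
              simp [bConsume, h1c, h2c, show d + 1 + 1 - 1 = 0 from by omega]
            rw [ha1, ha2, ihT rest hr (ans + 1), bTail, hb]
            ring
          · have ha2 : aStep (some x, 2 * d + 1, ans) c2 = (some x, 2 * (d + 1), ans) := by
              simp [aStep, h2c, hz, show 2 * d + 1 + 1 = 2 * (d + 1) from by ring]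
            have hb : bConsume x d (c1 :: c2 :: rest) = bConsume x (d + 1) rest := by
              simp [bConsume, h1c, h2c, hz, show d + 1 + 1 - 1 = d + 1 from by ring]
            rw [ha1, ha2, ihC rest hr x (d + 1) ans hz, bTail, bTail, hb]
        · -- first matches, second not: pair delta = 0, group continues with d
          have ha1 : aStep (some x, 2 * d, ans) c1 = (some x, 2 * d + 1, ans) := by
            simp [aStep, h1c, show ¬ (2 * d + 1 = 0) from by omega]
          have ha2 : aStep (some x, 2 * d + 1, ans) c2 = (some x, 2 * d, ans) := by
            simp [aStep, Ne.symm h2c, hd, show 2 * d + 1 - 1 = 2 * d from by ring]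
          have hb : bConsume x d (c1 :: c2 :: rest) = bConsume x d rest := by
            simp [bConsume, h1c, h2c, hd]
          rw [ha1, ha2, ihC rest hr x d ans hd, bTail, bTail, hb]
        · -- first not, second matches: pair delta = 0, group continues with d
          have ha1 : aStep (some x, 2 * d, ans) c1 = (some x, 2 * d - 1, ans) := by
            simp [aStep, Ne.symm h1c, show ¬ (2 * d - 1 = 0) from by omega]
          have ha2 : aStep (some x, 2 * d - 1, ans) c2 = (some x, 2 * d, ans) := by
            simp [aStep, h2c, hd, show 2 * d - 1 + 1 = 2 * d from by ring]
          have hb : bConsume x d (c1 :: c2 :: rest) = bConsume x d rest := by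
            simp [bConsume, h1c, h2c, hd]
          rw [ha1, ha2, ihC rest hr x d ans hd, bTail, bTail, hb]
        · -- neither matches: pair delta = -1
          have ha1 : aStep (some x, 2 * d, ans) c1 = (some x, 2 * d - 1, ans) := by
            simp [aStep, Ne.symm h1c, show ¬ (2 * d - 1 = 0) from by omega]
          by_cases hz : d - 1 = 0
          · have ha2 : aStep (some x, 2 * d - 1, ans) c2 = (none, 0, ans + 1) := by
              simp [aStep, Ne.symm h2c, show 2 * d - 1 - 1 = 0 from by omega]
            have hb : bConsume x d (c1 :: c2 :: rest) = some rest := by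
              simp [bConsume, h1c, h2c, hz]
            rw [ha1, ha2, ihT rest hr (ans + 1), bTail, hb]
            ring
          · have ha2 : aStep (some x, 2 * d - 1, ans) c2 = (some x, 2 * (d - 1), ans) := by
              simp [aStep, Ne.symm h2c, hz, show 2 * d - 1 - 1 = 2 * (d - 1) from by ring]
            have hb : bConsume x d (c1 :: c2 :: rest) = bConsume x (d - 1) rest := by
              simp [bConsume, h1c, h2c, hz]
            rw [ha1, ha2, ihC rest hr x (d - 1) ans hz, bTail, bTail, hb]

-- ===== VERDICT (by name: the statement is the Claim_ definition above) =====
theorem solution_spec : Claim_equal_solution := by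
  intro s _
  unfold Spec_solution solution solution_alt
  have := (joint s.toList.length).1 s.toList (le_refl _) 0
  simpa [finAns] using this
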